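-- pv_equiv track=rewrite | github.com/jso8910/advent_of_code | 2018/day_8/program.py | find_node_length
-- ===== SOURCE A (Python) =====
-- def find_node_length(node):
--     num_child_nodes = node[0]
--     num_metadata = node[1]
--     if num_child_nodes == 0:
--         return 2 + num_metadata
--     else:
--         size = 2
--         # offset = 2
--         for i in range(num_child_nodes):
--             size += find_node_length(node[size:])
--         return size + num_metadata
-- ===== SOURCE B (Python) =====
-- def find_node_length(node):
--     # Iterative single pass: explicit stack of (remaining_children, num_metadata)
--     # frames and an index that ends up being the node's total length.
--     stack = [(node[0], node[1])]
--     i = 2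
--     while stack:
--         c, m = stack[-1]
--         if c > 0:
--             stack[-1] = (c - 1, m)
--             stack.append((node[i], node[i + 1]))
--             i += 2
--         else:
--             stack.pop()
--             i += m
--     return i
-- ===== Notes on version B (the rewrite author's own statement) =====
-- stated objective: alternative
-- what changed: A's recursion that re-slices the list (node[size:]) for every child is replaced by a single left-to-right pass holding an explicit stack of (remaining_children, num_metadata) frames and one absolute index, so B does no slicing and no recursion.
-- outside the precondition, e.g. on find_node_length([2, 0, 0, -1, 0, 0]): A returns 5, B returns 5
import Mathlib
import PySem

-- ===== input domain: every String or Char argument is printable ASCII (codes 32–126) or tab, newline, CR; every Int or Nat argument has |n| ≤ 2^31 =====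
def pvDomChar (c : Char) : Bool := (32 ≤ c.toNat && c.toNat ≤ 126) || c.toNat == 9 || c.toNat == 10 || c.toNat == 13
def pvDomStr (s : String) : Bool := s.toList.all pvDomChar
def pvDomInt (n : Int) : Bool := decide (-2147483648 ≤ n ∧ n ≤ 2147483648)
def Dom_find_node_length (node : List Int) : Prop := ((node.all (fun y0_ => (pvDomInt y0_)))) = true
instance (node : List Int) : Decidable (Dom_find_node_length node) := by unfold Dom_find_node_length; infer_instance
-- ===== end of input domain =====

-- B replaces A's recursion-with-slicing by a single left-to-right pass with an
-- explicit stack of (remaining_children, num_metadata) frames and an index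
-- pointer; the equivalence proved below is on Pre_ (well-formed inputs).

-- ===== PORT A =====
-- literal port of A; `none` = IndexError / recursion budget exhausted
-- (the fuel node.length + 1 is proved sufficient on Pre_, see findA_of_parse).
mutual
def findA : Nat → List Int → Option Int
  | 0, _ => none
  | fuel + 1, xs =>
    match PySem.List.pyGet? xs 0 with           -- num_child_nodes = node[0]
    | none => none
    | some c =>
      match PySem.List.pyGet? xs 1 with         -- num_metadata = node[1]
      | none => none
      | some m =>
        if c = 0 then some (2 + m)              -- return 2 + num_metadata
        else
          match loopA fuel xs c.toNat 2 with    -- size = 2; for i in range(...)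
          | none => none
          | some size => some (size + m)        -- return size + num_metadata
termination_by fuel _ => (fuel, 0)
decreasing_by apply Prod.Lex.left; omega
def loopA : Nat → List Int → Nat → Int → Option Int
  | _,    _,  0,     size => some size
  | fuel, xs, k + 1, size =>
    match findA fuel (PySem.List.slice xs (some size) none) with  -- node[size:]
    | none => none
    | some t => loopA fuel xs k (size + t)      -- size += find_node_length(...)
termination_by fuel _ k _ => (fuel, k + 1)
decreasing_by
  · apply Prod.Lex.right; omega
  · apply Prod.Lex.right; omega
end

def find_node_length (node : List Int) : Int :=
  (findA (node.length + 1) node).getD 0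

-- ===== PORT B =====
-- literal port of B; the stack is kept top-first (Python's stack[-1] is the
-- head); `none` = IndexError / step budget exhausted (node.length + 1 is
-- proved sufficient on Pre_, see runB_of_stack).
def runB (node : List Int) : Nat → List (Int × Int) → Int → Option Int
  | 0, _, _ => none
  | _ + 1, [], i => some i                                  -- while stack: … return i
  | fuel + 1, (c, m) :: rest, i =>
    if 0 < c then
      match PySem.List.pyGet? node i, PySem.List.pyGet? node (i + 1) with
      | some nc, some nm => runB node fuel ((nc, nm) :: (c - 1, m) :: rest) (i + 2)
      | _, _ => none
    else
      runB node fuel rest (i + m)                           -- stack.pop(); i += m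

def find_node_length_alt (node : List Int) : Int :=
  match PySem.List.pyGet? node 0, PySem.List.pyGet? node 1 with
  | some c, some m => (runB node (node.length + 1) [(c, m)] 2).getD 0
  | _, _ => 0

-- ===== PRECONDITION & SPEC =====
-- pvParse is the grammar of the puzzle's input format: pvParse fuel k xs
-- succeeds iff xs starts with k complete trees -- a header of child count c
-- (c < 0 behaves like range(): no children) and nonnegative metadata count m,
-- then the children, then m metadata slots (which, like A, it never reads, so
-- they need not be materialised) -- returning (total length, node count, rest).
-- The argument `fuel` only makes the recursion structural (so that `decide`
-- can evaluate Pre_); node.length + 1 exceeds any reachable depth (pvParse_fuel).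
def pvParse : Nat → Nat → List Int → Option (Int × Nat × List Int)
  | _, 0, xs => some (0, 0, xs)
  | fuel + 1, k + 1, c :: m :: rest =>
    if m < 0 then none
    else
      match pvParse fuel c.toNat rest with
      | none => none
      | some (t1, n1, r1) =>
        match pvParse fuel k (r1.drop m.toNat) with
        | none => none
        | some (t2, n2, r2) => some (2 + t1 + m + t2, n1 + 1 + n2, r2)
  | _ + 1, _ + 1, _ => none
  | 0, _ + 1, _ => none

-- Pre_: node is a childless header (A's base case, with any metadata count),
-- or starts with one complete tree of the grammar.  Pre_ excludes encodings
-- with a negative metadata count at an inner node: a corner only degenerate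
-- input reaches, where A's value depends on Python's negative-slice semantics
-- (see claim.json cites; A and B still agree on much of it).
def Pre_find_node_length (node : List Int) : Prop :=
  (2 ≤ node.length ∧ node.headI ≤ 0) ∨ (pvParse (node.length + 1) 1 node).isSome = true
instance (node : List Int) : Decidable (Pre_find_node_length node) := by
  unfold Pre_find_node_length; infer_instance

def pvWitness_find_node_length : List Int :=
  [2, 3, 0, 3, 10, 11, 12, 1, 1, 0, 1, 99, 2, 1, 1, 2]

def Spec_find_node_length (node : List Int) (out : Int) : Prop := out = find_node_length_alt node
instance (node : List Int) (out : Int) : Decidable (Spec_find_node_length node out) := by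
  unfold Spec_find_node_length; infer_instance

-- ===== CLAIM (what is proved, stated in full; the proofs are below) =====
def Claim_equal_find_node_length : Prop := ∀ (node : List Int), Dom_find_node_length node → Pre_find_node_length node → Spec_find_node_length node (find_node_length node)

-- ===== LEMMAS AND PROOFS =====

theorem pyget_zero (a : Int) (l : List Int) : PySem.List.pyGet? (a :: l) 0 = some a :=
  PySem.List.pyGet?_zero_cons a l

theorem pyget_one (a b : Int) (l : List Int) : PySem.List.pyGet? (a :: b :: l) 1 = some b := by
  have h := PySem.List.pyGet?_cons_succ (x := a) (xs := b :: l) (n := 0)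
  simp at h
  convert h using 2
  norm_num

theorem pyget_drop (node : List Int) (i : Int) (hi : 0 ≤ i) (a : Int) (l : List Int)
    (h : node.drop i.toNat = a :: l) : PySem.List.pyGet? node i = some a := by
  rw [PySem.List.pyGet?_of_nonneg node hi]
  have h2 : (node.drop i.toNat)[0]? = some a := by rw [h]; rfl
  rw [List.getElem?_drop] at h2
  simpa using h2

-- every successful parse of k trees: total length is at least 2k, the rest is
-- the input minus the total length, and 2*(node count) + |rest| <= |input|
theorem pvParse_bounds : ∀ (fuel k : Nat) (xs : List Int) (t : Int) (n : Nat) (r : List Int),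
    pvParse fuel k xs = some (t, n, r) →
    2 * (k : Int) ≤ t ∧ r = xs.drop t.toNat ∧ 2 * n + r.length ≤ xs.length := by
  intro fuel
  induction fuel with
  | zero =>
    intro k xs t n r h
    cases k with
    | zero => simp [pvParse] at h; obtain ⟨h1, h2, h3⟩ := h; subst h1 h2 h3; simp
    | succ k => simp [pvParse] at h
  | succ fuel ih =>
    intro k xs t n r h
    cases k with
    | zero => simp [pvParse] at h; obtain ⟨h1, h2, h3⟩ := h; subst h1 h2 h3; simp
    | succ k =>
      match xs with
      | [] => simp [pvParse] at h
      | [c] => simp [pvParse] at h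
      | c :: m :: rest =>
        by_cases hm : m < 0
        · simp [pvParse, hm] at h
        · rcases h1 : pvParse fuel c.toNat rest with _ | ⟨t1, n1, r1⟩
          · simp [pvParse, hm, h1] at h
          · rcases h2 : pvParse fuel k (r1.drop m.toNat) with _ | ⟨t2, n2, r2⟩
            · simp [pvParse, hm, h1, h2] at h
            · simp [pvParse, hm, h1, h2] at h
              obtain ⟨ht, hn, hr⟩ := h
              obtain ⟨hb1, hd1, hl1⟩ := ih c.toNat rest t1 n1 r1 h1
              obtain ⟨hb2, hd2, hl2⟩ := ih k (r1.drop m.toNat) t2 n2 r2 h2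
              have ht1 : (0:Int) ≤ t1 := le_trans (by positivity) hb1
              have ht2 : (0:Int) ≤ t2 := le_trans (by positivity) hb2
              subst ht hn hr
              refine ⟨by push_cast; omega, ?_, ?_⟩
              · have htn : (2 + t1 + m + t2).toNat = (t2.toNat + (m.toNat + t1.toNat)) + 2 := by omega
                rw [htn, List.drop_succ_cons, List.drop_succ_cons, hd2, hd1,
                    List.drop_drop, List.drop_drop]
                congr 1; omega
              · have hld : (r1.drop m.toNat).length = r1.length - m.toNat := by
                  simp [List.length_drop]
                simp only [List.length_cons] at hl1 ⊢
                omega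

-- the fuel is irrelevant as soon as it exceeds the list length
theorem pvParse_fuel : ∀ (fuel fuel' k : Nat) (xs : List Int),
    xs.length < fuel → xs.length < fuel' →
    pvParse fuel k xs = pvParse fuel' k xs := by
  intro fuel
  induction fuel with
  | zero => intro fuel' k xs h h'; omega
  | succ fuel ih =>
    intro fuel' k xs h h'
    cases k with
    | zero =>
      cases fuel' with
      | zero => omega
      | succ fuel' => simp [pvParse]
    | succ k =>
      cases fuel' with
      | zero => omega
      | succ fuel' =>
        match xs with
        | [] => simp [pvParse]
        | [c] => simp [pvParse]
        | c :: m :: rest =>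
          simp only [List.length_cons] at h h'
          by_cases hm : m < 0
          · simp [pvParse, hm]
          · have e1 : pvParse fuel c.toNat rest = pvParse fuel' c.toNat rest :=
              ih fuel' c.toNat rest (by omega) (by omega)
            rcases h1 : pvParse fuel' c.toNat rest with _ | ⟨t1, n1, r1⟩
            · simp [pvParse, hm, e1, h1]
            · have hd1 := (pvParse_bounds fuel' c.toNat rest t1 n1 r1 h1).2.1
              have hlen : (r1.drop m.toNat).length < fuel := by
                rw [hd1]; simp only [List.length_drop]; omega
              have hlen' : (r1.drop m.toNat).length < fuel' := by
                rw [hd1]; simp only [List.length_drop]; omega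
              have e2 : pvParse fuel k (r1.drop m.toNat) = pvParse fuel' k (r1.drop m.toNat) :=
                ih fuel' k _ hlen hlen'
              simp [pvParse, hm, e1, h1, e2]

-- port A returns the parsed total length (any fuel > node count suffices)
theorem findA_of_parse : ∀ (L : Nat) (xs : List Int), xs.length < L →
    ∀ (t : Int) (n : Nat) (r : List Int),
      pvParse (xs.length + 1) 1 xs = some (t, n, r) →
      ∀ fuel : Nat, n < fuel → findA fuel xs = some t := by
  intro L
  induction L with
  | zero => intro xs h; omega
  | succ L ih =>
    intro xs hL t n r hp fuel hf
    match xs with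
    | [] => simp [pvParse] at hp
    | [c] => simp [pvParse] at hp
    | c :: m :: rest =>
      simp only [List.length_cons] at hL hp
      by_cases hm : m < 0
      · simp [pvParse, hm] at hp
      · rcases h1 : pvParse (rest.length + 1 + 1) c.toNat rest with _ | ⟨t1, n1, r1⟩
        · simp [pvParse, hm, h1] at hp
        · simp [pvParse, hm, h1] at hp
          obtain ⟨ht, hn, hr⟩ := hp
          obtain ⟨hb1, hd1, hl1⟩ := pvParse_bounds _ _ _ _ _ _ h1
          have ht1 : (0:Int) ≤ t1 := le_trans (by positivity) hb1
          obtain ⟨f, rfl⟩ : ∃ f, fuel = f + 1 := ⟨fuel - 1, by omega⟩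
          -- the children loop
          have loopLem : ∀ (k : Nat) (size t' : Int) (n' : Nat) (r' : List Int),
              2 ≤ size →
              pvParse (((c :: m :: rest).drop size.toNat).length + 1) k ((c :: m :: rest).drop size.toNat) = some (t', n', r') →
              n' < f → loopA f (c :: m :: rest) k size = some (size + t') := by
            intro k
            induction k with
            | zero =>
              intro size t' n' r' hsz hp' hn'
              simp [pvParse] at hp'
              simp [loopA, hp'.1]
            | succ k ihk =>
              intro size t' n' r' hsz hp' hn'
              cases hys : (c :: m :: rest).drop size.toNat with
              | nil => rw [hys] at hp'; simp [pvParse] at hp'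
              | cons c' ys' =>
                cases ys' with
                | nil => rw [hys] at hp'; simp [pvParse] at hp'
                | cons m' rest' =>
                  rw [hys] at hp'
                  simp only [List.length_cons] at hp'
                  by_cases hm' : m' < 0
                  · simp [pvParse, hm'] at hp'
                  · rcases ha : pvParse (rest'.length + 1 + 1) c'.toNat rest' with _ | ⟨ta, na, ra⟩
                    · simp [pvParse, hm', ha] at hp'
                    · rcases hb : pvParse (rest'.length + 1 + 1) k (ra.drop m'.toNat) with _ | ⟨tb, nb, rb⟩
                      · simp [pvParse, hm', ha, hb] at hp'
                      · simp [pvParse, hm', ha, hb] at hp'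
                        obtain ⟨ht', hn2, hr'⟩ := hp'
                        obtain ⟨hba, hda, hla⟩ := pvParse_bounds _ _ _ _ _ _ ha
                        have hta : (0:Int) ≤ ta := le_trans (by positivity) hba
                        have hZlen : (c' :: m' :: rest').length < L := by
                          have := List.length_drop (l := c :: m :: rest) (i := size.toNat)
                          rw [hys] at this
                          simp only [List.length_cons] at this hL ⊢
                          omega
                        -- the child itself is a complete tree of the grammar
                        have hp1 : pvParse ((c' :: m' :: rest').length + 1) 1 (c' :: m' :: rest')
                            = some (2 + ta + m' + 0, na + 1 + 0, (ra.drop m'.toNat).drop (0:Int).toNat) := by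
                          simp only [List.length_cons]
                          simp [pvParse, hm', ha]
                        have hfind : findA f (c' :: m' :: rest') = some (2 + ta + m' + 0) :=
                          ih _ hZlen _ _ _ hp1 f (by omega)
                        have hslice : PySem.List.slice (c :: m :: rest) (some size) none
                            = c' :: m' :: rest' := by
                          rw [PySem.List.slice_from _ (show (0:Int) ≤ size by omega), hys]
                        -- the remaining k children start right after this child
                        have hrest' : rest' = (c :: m :: rest).drop (size.toNat + 2) := by
                          have h2 := congrArg (List.drop 2) hys
                          simpa [List.drop_drop, Nat.add_comm] using h2.symm
                        have hW : (c :: m :: rest).drop (size + (2 + ta + m' + 0)).toNat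
                            = ra.drop m'.toNat := by
                          rw [hda, hrest', List.drop_drop, List.drop_drop]
                          congr 1
                          omega
                        have hWlen : ((c :: m :: rest).drop (size + (2 + ta + m' + 0)).toNat).length
                            < rest'.length + 1 + 1 := by
                          rw [hW, hda]
                          simp only [List.length_drop]
                          omega
                        have hp2 : pvParse (((c :: m :: rest).drop (size + (2 + ta + m' + 0)).toNat).length + 1) k
                            ((c :: m :: rest).drop (size + (2 + ta + m' + 0)).toNat) = some (tb, nb, rb) := by
                          rw [pvParse_fuel _ (rest'.length + 1 + 1) _ _ (by omega) hWlen, hW]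
                          exact hb
                        have hnext := ihk (size + (2 + ta + m' + 0)) tb nb rb (by omega) hp2 (by omega)
                        rw [loopA, hslice, hfind]
                        dsimp only
                        rw [hnext]
                        congr 1
                        omega
          by_cases hc : c = 0
          · subst hc
            simp [pvParse] at h1
            obtain ⟨e1, e2, e3⟩ := h1
            have : findA (f + 1) ((0:Int) :: m :: rest) = some (2 + m) := by
              simp [findA]
            rw [this]
            congr 1
            omega
          · have h1' : pvParse (rest.length + 1) c.toNat rest = some (t1, n1, r1) := by
              rw [pvParse_fuel _ (rest.length + 1 + 1) _ _ (by omega) (by omega)]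
              exact h1
            have hdrop2 : (c :: m :: rest).drop ((2:Int)).toNat = rest := rfl
            have hloop := loopLem c.toNat 2 t1 n1 r1 (by omega) (by rw [hdrop2]; exact h1') (by omega)
            have : findA (f + 1) (c :: m :: rest) = some (2 + t1 + m) := by
              rw [findA, pyget_zero, pyget_one]
              simp only [hc, if_false]
              rw [hloop]
            rw [this, ht]

-- stack invariant for B: each frame (c, m) owes c more subtrees starting at
-- the current index, then adds m; `cost` counts B's remaining loop steps
inductive StackOK (node : List Int) : Int → List (Int × Int) → Nat → Int → Prop
  | nil (i : Int) : StackOK node i [] 0 i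
  | cons (i c m : Int) (rest : List (Int × Int)) (cost : Nat) (fin t : Int) (n : Nat)
      (r : List Int)
      (hi : 0 ≤ i)
      (hp : pvParse ((node.drop i.toNat).length + 1) c.toNat (node.drop i.toNat) = some (t, n, r))
      (hs : StackOK node (i + t + m) rest cost fin) :
      StackOK node i ((c, m) :: rest) (2 * n + 1 + cost) fin

-- port B returns the stack's final index once the fuel exceeds the cost
theorem runB_of_stack : ∀ (node : List Int) (fuel : Nat) (stack : List (Int × Int)) (i : Int)
    (cost : Nat) (fin : Int),
    StackOK node i stack cost fin → cost < fuel → runB node fuel stack i = some fin := by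
  intro node fuel
  induction fuel with
  | zero => intro stack i cost fin hs hc; omega
  | succ fuel ih =>
    intro stack i cost fin hs hc
    cases hs with
    | nil => simp [runB]
    | cons i c m rest cost' fin t n r hi hp hstk =>
      by_cases hcpos : 0 < c
      · -- push a child frame
        have hk : c.toNat = (c.toNat - 1) + 1 := by omega
        rw [hk] at hp
        cases hysc : node.drop i.toNat with
        | nil => rw [hysc] at hp; simp [pvParse] at hp
        | cons nc ys' =>
          cases ys' with
          | nil => rw [hysc] at hp; simp [pvParse] at hp
          | cons nm rest' =>
            rw [hysc] at hp
            simp only [List.length_cons] at hp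
            by_cases hnm : nm < 0
            · simp [pvParse, hnm] at hp
            · rcases ha : pvParse (rest'.length + 1 + 1) nc.toNat rest' with _ | ⟨ta, na, ra⟩
              · simp [pvParse, hnm, ha] at hp
              · rcases hb : pvParse (rest'.length + 1 + 1) (c.toNat - 1) (ra.drop nm.toNat)
                    with _ | ⟨tb, nb, rb⟩
                · simp [pvParse, hnm, ha, hb] at hp
                · simp [pvParse, hnm, ha, hb] at hp
                  obtain ⟨ht, hn, hr⟩ := hp
                  obtain ⟨hba, hda, hla⟩ := pvParse_bounds _ _ _ _ _ _ ha
                  have hta : (0:Int) ≤ ta := le_trans (by positivity) hba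
                  have hget1 : PySem.List.pyGet? node i = some nc := pyget_drop _ _ hi _ _ hysc
                  have hd1 : node.drop (i + 1).toNat = nm :: rest' := by
                    have h2 := congrArg (List.drop 1) hysc
                    simp only [List.drop_drop] at h2
                    rw [show (i + 1).toNat = i.toNat + 1 by omega]
                    simpa using h2
                  have hget2 : PySem.List.pyGet? node (i + 1) = some nm :=
                    pyget_drop _ _ (by omega) _ _ hd1
                  have hd2 : node.drop (i + 2).toNat = rest' := by
                    have h2 := congrArg (List.drop 1) hd1
                    simp only [List.drop_drop] at h2
                    rw [show (i + 2).toNat = (i + 1).toNat + 1 by omega]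
                    simpa using h2
                  -- child frame is well-formed
                  have hp_child : pvParse ((node.drop (i + 2).toNat).length + 1) nc.toNat
                      (node.drop (i + 2).toNat) = some (ta, na, ra) := by
                    rw [hd2, pvParse_fuel _ (rest'.length + 1 + 1) _ _ (by omega) (by omega)]
                    exact ha
                  -- parent frame, one child fewer, resumes after the child
                  have hW : node.drop (i + 2 + ta + nm).toNat = ra.drop nm.toNat := by
                    rw [hda, ← hd2, List.drop_drop, List.drop_drop]
                    congr 1
                    omega
                  have hlenW : (ra.drop nm.toNat).length ≤ rest'.length := by
                    rw [hda]; simp only [List.length_drop]; omega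
                  have hp_par0 : pvParse ((ra.drop nm.toNat).length + 1) (c.toNat - 1)
                      (ra.drop nm.toNat) = some (tb, nb, rb) := by
                    rw [pvParse_fuel _ (rest'.length + 1 + 1) _ _ (by omega) (by omega)]
                    exact hb
                  have hp_par : pvParse ((node.drop (i + 2 + ta + nm).toNat).length + 1)
                      (c - 1).toNat (node.drop (i + 2 + ta + nm).toNat) = some (tb, nb, rb) := by
                    rw [show (c - 1).toNat = c.toNat - 1 by omega, hW]
                    exact hp_par0
                  have hstk2 : StackOK node (i + 2) ((nc, nm) :: (c - 1, m) :: rest)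
                      (2 * na + 1 + (2 * nb + 1 + cost')) fin := by
                    refine StackOK.cons _ _ _ _ _ _ _ _ _ (by omega) hp_child ?_
                    refine StackOK.cons _ _ _ _ _ _ _ _ _ (by omega) hp_par ?_
                    rw [show i + 2 + ta + nm + tb + m = i + t + m by omega]
                    exact hstk
                  have hrun : runB node (fuel + 1) ((c, m) :: rest) i
                      = runB node fuel ((nc, nm) :: (c - 1, m) :: rest) (i + 2) := by
                    simp [runB, hcpos, hget1, hget2]
                  rw [hrun]
                  exact ih _ _ _ _ hstk2 (by omega)
      · -- pop the finished frame
        have hc0 : c.toNat = 0 := by omega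
        rw [hc0] at hp
        simp [pvParse] at hp
        obtain ⟨ht, hn, hr⟩ := hp
        have hrun : runB node (fuel + 1) ((c, m) :: rest) i = runB node fuel rest (i + m) := by
          simp [runB, hcpos]
        rw [hrun]
        have hstk' : StackOK node (i + m) rest cost' fin := by
          rw [show i + m = i + t + m by omega]
          exact hstk
        exact ih rest (i + m) cost' fin hstk' (by omega)

-- ===== VERDICT (by name: the statement is the Claim_ definition above) =====
theorem find_node_length_spec : Claim_equal_find_node_length := by
  unfold Claim_equal_find_node_length
  intro node _ hpre
  unfold Spec_find_node_length
  match node with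
  | [] =>
    rcases hpre with ⟨h1, _⟩ | h2
    · simp at h1
    · simp [pvParse] at h2
  | [c] =>
    rcases hpre with ⟨h1, _⟩ | h2
    · simp at h1
    · simp [pvParse] at h2
  | c :: m :: rest =>
    rcases hpre with ⟨-, hhead⟩ | hparse
    · -- childless header: both return 2 + m
      simp only [List.headI] at hhead
      have hc0 : c.toNat = 0 := by omega
      have hcneg : ¬(0 < c) := by omega
      have hA : find_node_length (c :: m :: rest) = 2 + m := by
        unfold find_node_length
        simp only [List.length_cons]
        by_cases hc : c = 0
        · simp [findA, hc]
        · rw [findA, pyget_zero, pyget_one]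
          simp only [hc, if_false, hc0]
          rw [loopA]
          simp
      have hB : find_node_length_alt (c :: m :: rest) = 2 + m := by
        unfold find_node_length_alt
        rw [pyget_zero, pyget_one]
        simp only [List.length_cons]
        rw [runB]
        simp only [hcneg, if_false]
        rw [runB]
        simp
      rw [hA, hB]
    · rw [Option.isSome_iff_exists] at hparse
      obtain ⟨⟨t, n, r⟩, hp⟩ := hparse
      simp only [List.length_cons] at hp
      by_cases hm : m < 0
      · simp [pvParse, hm] at hp
      · rcases h1 : pvParse (rest.length + 1 + 1) c.toNat rest with _ | ⟨t1, n1, r1⟩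
        · simp [pvParse, hm, h1] at hp
        · simp [pvParse, hm, h1] at hp
          obtain ⟨ht, hn, hr⟩ := hp
          obtain ⟨hb1, hd1, hl1⟩ := pvParse_bounds _ _ _ _ _ _ h1
          have ht1 : (0:Int) ≤ t1 := le_trans (by positivity) hb1
          -- Port A returns t
          have hp' : pvParse ((c :: m :: rest).length + 1) 1 (c :: m :: rest)
              = some (t, n, r) := by
            simp only [List.length_cons]
            simp [pvParse, hm, h1, ht, hn, hr]
          have hA : findA ((c :: m :: rest).length + 1) (c :: m :: rest) = some t := by
            refine findA_of_parse ((c :: m :: rest).length + 1) _ (by simp) _ _ _ hp' _ ?_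
            simp only [List.length_cons]
            omega
          -- Port B returns t
          have hdrop2 : (c :: m :: rest).drop ((2:Int)).toNat = rest := rfl
          have hstk : StackOK (c :: m :: rest) 2 [(c, m)] (2 * n1 + 1 + 0) (2 + t1 + m) := by
            refine StackOK.cons _ _ _ _ _ _ _ _ r1 (by omega) ?_ (StackOK.nil _)
            rw [hdrop2, pvParse_fuel _ (rest.length + 1 + 1) _ _ (by omega) (by omega)]
            exact h1
          have hB : runB (c :: m :: rest) ((c :: m :: rest).length + 1) [(c, m)] 2
              = some (2 + t1 + m) := by
            refine runB_of_stack _ _ _ _ _ _ hstk ?_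
            simp only [List.length_cons]
            omega
          unfold find_node_length find_node_length_alt
          rw [hA, pyget_zero, pyget_one]
          dsimp only
          rw [hB, ht]
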